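-- pv_equiv track=rewrite | github.com/FB-Reda/advent-of-code | 2024/Day 5/day5.py | check_order_for_update
-- ===== SOURCE A (Python) =====
-- def check_order_for_update(pages, rules):
--     # Check all relevant rules
--     for (X, Y) in rules:
--         if X in pages and Y in pages:
--             posX = pages.index(X)
--             posY = pages.index(Y)
--             if posX > posY:
--                 return False
--     return True
-- ===== SOURCE B (Python) =====
-- def check_order_for_update(pages, rules):
--     # Single forward pass over pages keeping the set of pages already seen;
--     # a rule (X, Y) is violated exactly when X's first occurrence comes after Y's.
--     seen = set()
--     for p in pages:
--         if p in seen: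
--             continue
--         if any(x == p and y in seen for (x, y) in rules):
--             return False
--         seen.add(p)
--     return True
-- ===== Notes on version B (the rewrite author's own statement) =====
-- stated objective: alternative
-- what changed: Instead of scanning the rules and calling pages.index twice per rule, B makes one forward pass over pages maintaining a `seen` set of first occurrences and fails when the current page is a rule's X whose Y was already seen.
import Mathlib
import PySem

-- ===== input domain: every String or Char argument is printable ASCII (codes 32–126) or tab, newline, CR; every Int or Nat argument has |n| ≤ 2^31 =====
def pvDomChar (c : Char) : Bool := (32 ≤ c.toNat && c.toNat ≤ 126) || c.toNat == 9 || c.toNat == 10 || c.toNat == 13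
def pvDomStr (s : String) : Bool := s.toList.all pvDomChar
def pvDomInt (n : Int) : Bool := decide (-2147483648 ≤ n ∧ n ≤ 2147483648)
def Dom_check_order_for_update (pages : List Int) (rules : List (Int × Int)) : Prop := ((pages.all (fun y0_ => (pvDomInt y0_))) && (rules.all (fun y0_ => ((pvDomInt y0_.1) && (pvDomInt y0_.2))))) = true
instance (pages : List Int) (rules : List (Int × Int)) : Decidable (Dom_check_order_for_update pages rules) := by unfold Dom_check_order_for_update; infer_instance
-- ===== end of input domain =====

-- B replaces A's scan over rules with repeated pages.index lookups by one forward
-- pass over pages keeping a `seen` set (objective: alternative decomposition).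

-- ===== PORT A =====
-- Literal port of A: loop over rules; for each rule with both members present,
-- compare the first-occurrence indices (pages.index). The .index calls cannot
-- raise because membership was just checked, so .getD 0 is never the default.
def check_order_for_update (pages : List Int) (rules : List (Int × Int)) : Bool :=
  match rules with
  | [] => true
  | (X, Y) :: rest =>
    if pages.contains X && pages.contains Y then
      let posX := (PySem.List.index? pages X).getD 0
      let posY := (PySem.List.index? pages Y).getD 0
      if posY < posX then false
      else check_order_for_update pages rest
    else check_order_for_update pages rest

-- ===== PORT B =====
-- Loop of Source B: walk pages, skip already-seen pages, fail if some rule (x, y)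
-- has x equal to the current page and y already seen.
def coLoop (rules : List (Int × Int)) (ps : List Int) (seen : PySem.Set Int) : Bool :=
  match ps with
  | [] => true
  | p :: rest =>
    if PySem.Set.contains seen p then coLoop rules rest seen
    else if rules.any (fun r => r.1 == p && PySem.Set.contains seen r.2) then false
    else coLoop rules rest (PySem.Set.add seen p)

def check_order_for_update_alt (pages : List Int) (rules : List (Int × Int)) : Bool :=
  coLoop rules pages PySem.Set.empty

-- ===== PRECONDITION & SPEC =====
def Spec_check_order_for_update (pages : List Int) (rules : List (Int × Int)) (out : Bool) : Prop := out = check_order_for_update_alt pages rules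
instance (pages : List Int) (rules : List (Int × Int)) (out : Bool) : Decidable (Spec_check_order_for_update pages rules out) := by unfold Spec_check_order_for_update; infer_instance

-- ===== CLAIM (what is proved, stated in full; the proofs are below) =====
def Claim_equal_check_order_for_update : Prop := ∀ (pages : List Int) (rules : List (Int × Int)), Dom_check_order_for_update pages rules → Spec_check_order_for_update pages rules (check_order_for_update pages rules)

-- ===== LEMMAS AND PROOFS =====

-- A rule r is violated in A's sense: both members occur and Y's first index is smaller.
def pvVio (ps : List Int) (r : Int × Int) : Bool :=
  decide (r.1 ∈ ps) && decide (r.2 ∈ ps) && decide (ps.idxOf r.2 < ps.idxOf r.1)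

-- A rule r is violated in B's sense, relative to the remaining pages ps and the seen set.
def pvBad (ps seen : List Int) (r : Int × Int) : Bool :=
  decide (r.1 ∉ seen) && decide (r.1 ∈ ps) &&
    (decide (r.2 ∈ seen) || (decide (r.2 ∈ ps) && decide (ps.idxOf r.2 < ps.idxOf r.1)))

theorem pv_idxOf?_of_mem (xs : List Int) (v : Int) (h : v ∈ xs) :
    xs.idxOf? v = some (xs.idxOf v) := by
  induction xs with
  | nil => cases h
  | cons a l ih =>
    by_cases hv : a = v
    · subst hv; simp [List.idxOf?_cons, List.idxOf_cons_self]
    · have hm : v ∈ l := (List.mem_cons.mp h).resolve_left (fun e => hv e.symm)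
      simp [List.idxOf?_cons, hv, ih hm, List.idxOf_cons_ne _ hv]

theorem pv_idxOf?_getD (xs : List Int) (v : Int) (h : v ∈ xs) :
    (xs.idxOf? v).getD 0 = xs.idxOf v := by
  rw [pv_idxOf?_of_mem xs v h]; rfl

-- A computes exactly "no rule is violated".
theorem pvA_char (pages : List Int) (rules : List (Int × Int)) :
    check_order_for_update pages rules = !rules.any (pvVio pages) := by
  induction rules with
  | nil => rfl
  | cons r rest ih =>
    obtain ⟨X, Y⟩ := r
    by_cases hX : X ∈ pages
    · by_cases hY : Y ∈ pages
      · by_cases hlt : pages.idxOf Y < pages.idxOf X <;>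
          simp [check_order_for_update, hX, hY, pv_idxOf?_getD pages X hX,
            pv_idxOf?_getD pages Y hY, List.any_cons, pvVio, ih, hlt]
      · simp [check_order_for_update, hY, List.any_cons, pvVio, ih]
    · simp [check_order_for_update, hX, List.any_cons, pvVio, ih]

-- Loop invariant: B's loop returns true iff no rule is pvBad for the remaining
-- pages and the current seen set.
theorem pvLoop_char (rules : List (Int × Int)) (ps : List Int) (seen : PySem.Set Int) :
    coLoop rules ps seen = !rules.any (pvBad ps seen) := by
  induction ps generalizing seen with
  | nil => simp [coLoop, pvBad]
  | cons p rest ih =>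
    by_cases hp : p ∈ seen
    · have hcont : PySem.Set.contains seen p = true := by
        simpa [PySem.Set.contains_iff] using hp
      rw [coLoop]; rw [if_pos hcont, ih]
      congr 1
      apply PySem.List.any_congr_mem
      intro r _
      by_cases h1 : r.1 = p
      · simp [pvBad, h1, hp]
      · by_cases h2 : r.2 = p
        · simp [pvBad, h2, hp, h1, List.idxOf_cons_ne _ (fun e => h1 e.symm)]
        · simp [pvBad, h1, h2, List.idxOf_cons_ne _ (fun e => h1 e.symm),
            List.idxOf_cons_ne _ (fun e => h2 e.symm)]
    · have hcont : PySem.Set.contains seen p = false := by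
        simpa [PySem.Set.contains_iff] using hp
      rw [coLoop]; rw [if_neg (by simpa using hp)]
      by_cases hq : rules.any (fun r => r.1 == p && PySem.Set.contains seen r.2) = true
      · rw [if_pos hq]
        obtain ⟨r, hr, hrp⟩ := List.any_eq_true.mp hq
        have h1 : r.1 = p := by
          have := (Bool.and_eq_true _ _).mp hrp
          exact beq_iff_eq.mp this.1
        have h2 : r.2 ∈ seen := by
          have := (Bool.and_eq_true _ _).mp hrp
          exact (PySem.Set.contains_iff _ _).mp this.2
        symm
        simp only [Bool.not_eq_false']
        refine List.any_eq_true.mpr ⟨r, hr, ?_⟩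
        simp [pvBad, h1, hp, h2]
      · rw [if_neg hq]
        have hadd : PySem.Set.add seen p = seen ++ [p] := PySem.Set.add_of_not_mem hp
        rw [ih, hadd]
        congr 1
        apply PySem.List.any_congr_mem
        intro r hr
        have hnr : ¬ (r.1 = p ∧ r.2 ∈ seen) := by
          intro ⟨e1, e2⟩
          exact hq (List.any_eq_true.mpr ⟨r, hr, by simp [e1, e2]⟩)
        by_cases h1 : r.1 = p
        · have h2s : r.2 ∉ seen := fun e2 => hnr ⟨h1, e2⟩
          by_cases h2 : r.2 = p
          · simp [pvBad, h1, h2, hp]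
          · simp [pvBad, h1, h2, hp, h2s, List.idxOf_cons_self,
              List.idxOf_cons_ne _ (fun e => h2 e.symm)]
        · by_cases h2 : r.2 = p
          · by_cases hm1 : r.1 ∈ rest
            · simp [pvBad, h1, h2, hp, hm1, List.idxOf_cons_self,
                List.idxOf_cons_ne _ (fun e => h1 e.symm)]
            · simp [pvBad, h1, h2, hp, hm1]
          · simp [pvBad, h1, h2, List.idxOf_cons_ne _ (fun e => h1 e.symm),
              List.idxOf_cons_ne _ (fun e => h2 e.symm)]

theorem pvBad_nil_seen (ps : List Int) (r : Int × Int) : pvBad ps [] r = pvVio ps r := by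
  simp [pvBad, pvVio, Bool.and_assoc]

-- ===== VERDICT (by name: the statement is the Claim_ definition above) =====
theorem check_order_for_update_spec : Claim_equal_check_order_for_update := by
  intro pages rules _
  unfold Spec_check_order_for_update check_order_for_update_alt
  rw [pvA_char, pvLoop_char]
  congr 1
  exact PySem.List.any_congr_mem (fun r _ => (pvBad_nil_seen pages r).symm)
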